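-- pv_equiv track=rewrite | github.com/imtambovtcev/pyquizhub | creator_web/app.py | _calculate_distribution
-- ===== SOURCE A (Python) =====
-- def _calculate_distribution(scores: list) -> dict:
--     """Calculate score distribution in quartiles."""
--     if not scores:
--         return {}
--
--     sorted_scores = sorted(scores)
--     n = len(sorted_scores)
--
--     return {
--         '0-25%': len([s for s in scores if s <= sorted_scores[n // 4]]) if n > 0 else 0,
--         '25-50%': len([s for s in scores if sorted_scores[n // 4] < s <= sorted_scores[n // 2]]) if n > 1 else 0,
--         '50-75%': len([s for s in scores if sorted_scores[n // 2] < s <= sorted_scores[3 * n // 4]]) if n > 2 else 0,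
--         '75-100%': len([s for s in scores if s > sorted_scores[3 * n // 4]]) if n > 3 else 0,
--     }
-- ===== SOURCE B (Python) =====
-- def _calculate_distribution(scores: list) -> dict:
--     """Calculate score distribution in quartiles (single pass over four counters)."""
--     if not scores:
--         return {}
--     ss = sorted(scores)
--     n = len(ss)
--     b0, b1, b2 = ss[n // 4], ss[n // 2], ss[3 * n // 4]
--     c0 = c1 = c2 = c3 = 0
--     for s in scores:
--         if s <= b0:
--             c0 += 1
--         elif s <= b1:
--             c1 += 1
--         elif s <= b2:
--             c2 += 1
--         else:
--             c3 += 1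
--     return {'0-25%': c0, '25-50%': c1, '50-75%': c2, '75-100%': c3}
-- ===== Notes on version B (the rewrite author's own statement) =====
-- stated objective: faster
-- what changed: Replaces A's four separate filtering passes over scores (with redundant small-n guards) by a single pass accumulating four counters via if/elif against the three precomputed quartile boundaries.
import Mathlib
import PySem

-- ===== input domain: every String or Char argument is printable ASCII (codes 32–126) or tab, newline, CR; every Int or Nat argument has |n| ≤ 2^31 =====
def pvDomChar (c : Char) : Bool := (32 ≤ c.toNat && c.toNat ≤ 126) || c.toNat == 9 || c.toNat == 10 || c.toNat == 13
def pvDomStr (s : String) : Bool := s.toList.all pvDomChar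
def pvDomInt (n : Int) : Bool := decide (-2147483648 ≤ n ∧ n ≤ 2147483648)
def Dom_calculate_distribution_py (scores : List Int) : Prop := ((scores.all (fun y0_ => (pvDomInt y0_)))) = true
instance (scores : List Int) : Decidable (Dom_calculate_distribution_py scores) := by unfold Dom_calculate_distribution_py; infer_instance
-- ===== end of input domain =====

-- B replaces A's four filtering passes by one pass over four counters; objective: simpler.

-- ===== PORT A =====
def calculate_distribution_py (scores : List Int) : List (String × Int) :=
  if scores = [] then []
  else
    let sorted_scores := PySem.List.sorted scores (fun x => x) false
    let n : Int := sorted_scores.length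
    let q1 := PySem.List.pyGetD sorted_scores (PySem.Int.floordiv n 4) 0
    let q2 := PySem.List.pyGetD sorted_scores (PySem.Int.floordiv n 2) 0
    let q3 := PySem.List.pyGetD sorted_scores (PySem.Int.floordiv (3 * n) 4) 0
    [("0-25%", if n > 0 then ((scores.filter (fun s => decide (s ≤ q1))).length : Int) else 0),
     ("25-50%", if n > 1 then ((scores.filter (fun s => decide (q1 < s) && decide (s ≤ q2))).length : Int) else 0),
     ("50-75%", if n > 2 then ((scores.filter (fun s => decide (q2 < s) && decide (s ≤ q3))).length : Int) else 0),
     ("75-100%", if n > 3 then ((scores.filter (fun s => decide (q3 < s))).length : Int) else 0)]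

-- ===== PORT B =====
def calculate_distribution_py_alt (scores : List Int) : List (String × Int) :=
  if scores = [] then []
  else
    let ss := PySem.List.sorted scores (fun x => x) false
    let n : Int := ss.length
    let b0 := PySem.List.pyGetD ss (PySem.Int.floordiv n 4) 0
    let b1 := PySem.List.pyGetD ss (PySem.Int.floordiv n 2) 0
    let b2 := PySem.List.pyGetD ss (PySem.Int.floordiv (3 * n) 4) 0
    let c := scores.foldl (fun (c : Int × Int × Int × Int) s =>
        if s ≤ b0 then (c.1 + 1, c.2.1, c.2.2.1, c.2.2.2)
        else if s ≤ b1 then (c.1, c.2.1 + 1, c.2.2.1, c.2.2.2)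
        else if s ≤ b2 then (c.1, c.2.1, c.2.2.1 + 1, c.2.2.2)
        else (c.1, c.2.1, c.2.2.1, c.2.2.2 + 1)) (0, 0, 0, 0)
    [("0-25%", c.1), ("25-50%", c.2.1), ("50-75%", c.2.2.1), ("75-100%", c.2.2.2)]

-- ===== PRECONDITION & SPEC =====
def Spec_calculate_distribution_py (scores : List Int) (out : List (String × Int)) : Prop := out = calculate_distribution_py_alt scores
instance (scores : List Int) (out : List (String × Int)) : Decidable (Spec_calculate_distribution_py scores out) := by unfold Spec_calculate_distribution_py; infer_instance

-- ===== CLAIM (what is proved, stated in full; the proofs are below) =====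
def Claim_equal_calculate_distribution_py : Prop := ∀ (scores : List Int), Dom_calculate_distribution_py scores → Spec_calculate_distribution_py scores (calculate_distribution_py scores)

-- ===== LEMMAS AND PROOFS =====

lemma fold_quartiles (b0 b1 b2 : Int) (l : List Int) (a0 a1 a2 a3 : Int) :
    l.foldl (fun (c : Int × Int × Int × Int) s =>
        if s ≤ b0 then (c.1 + 1, c.2.1, c.2.2.1, c.2.2.2)
        else if s ≤ b1 then (c.1, c.2.1 + 1, c.2.2.1, c.2.2.2)
        else if s ≤ b2 then (c.1, c.2.1, c.2.2.1 + 1, c.2.2.2)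
        else (c.1, c.2.1, c.2.2.1, c.2.2.2 + 1)) (a0, a1, a2, a3)
    = (a0 + l.countP (fun s => decide (s ≤ b0)),
       a1 + l.countP (fun s => !decide (s ≤ b0) && decide (s ≤ b1)),
       a2 + l.countP (fun s => !decide (s ≤ b0) && !decide (s ≤ b1) && decide (s ≤ b2)),
       a3 + l.countP (fun s => !decide (s ≤ b0) && !decide (s ≤ b1) && !decide (s ≤ b2))) := by
  induction l generalizing a0 a1 a2 a3 with
  | nil => simp
  | cons x t ih =>
    simp only [List.foldl_cons, List.countP_cons]
    by_cases h1 : x ≤ b0 <;> by_cases h2 : x ≤ b1 <;> by_cases h3 : x ≤ b2 <;>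
      simp [h1, h2, h3, ih] <;> omega

lemma mem_le_sorted_top (scores : List Int) (s : Int) (hs : s ∈ scores) (i : Nat)
    (hi : i < (PySem.List.sorted scores (fun x => x) false).length)
    (htop : (PySem.List.sorted scores (fun x => x) false).length ≤ i + 1) :
    s ≤ (PySem.List.sorted scores (fun x => x) false)[i] := by
  have hm : s ∈ PySem.List.sorted scores (fun x => x) false := by
    rw [PySem.List.mem_sorted]; exact hs
  obtain ⟨p, hp, hpe⟩ := List.mem_iff_getElem.mp hm
  rw [← hpe]
  exact PySem.List.sorted_id_getElem_mono scores (q := i) (by omega) hi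

-- ===== VERDICT (by name: the statement is the Claim_ definition above) =====
theorem calculate_distribution_py_spec : Claim_equal_calculate_distribution_py := by
  intro scores _
  unfold Spec_calculate_distribution_py calculate_distribution_py calculate_distribution_py_alt
  by_cases h : scores = []
  · simp [h]
  · simp only [if_neg h]
    rw [fold_quartiles]
    have hlen : (PySem.List.sorted scores (fun x => x) false).length = scores.length :=
      PySem.List.length_sorted scores (fun x => x) false
    have hpos : 0 < scores.length := List.length_pos_iff.mpr h
    simp only [hlen]
    have e1 : PySem.Int.floordiv ((scores.length : Int)) 4 = ((scores.length / 4 : Nat) : Int) := by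
      rw [PySem.Int.floordiv_eq_ediv_of_pos (by norm_num)]; omega
    have e2 : PySem.Int.floordiv ((scores.length : Int)) 2 = ((scores.length / 2 : Nat) : Int) := by
      rw [PySem.Int.floordiv_eq_ediv_of_pos (by norm_num)]; omega
    have e3 : PySem.Int.floordiv (3 * (scores.length : Int)) 4 = ((3 * scores.length / 4 : Nat) : Int) := by
      rw [PySem.Int.floordiv_eq_ediv_of_pos (by norm_num)]; omega
    rw [e1, e2, e3]
    simp only [PySem.List.pyGetD_natCast]
    rw [List.getD_eq_getElem _ 0 (show scores.length / 4 < (PySem.List.sorted scores (fun x => x) false).length by omega),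
       List.getD_eq_getElem _ 0 (show scores.length / 2 < (PySem.List.sorted scores (fun x => x) false).length by omega),
       List.getD_eq_getElem _ 0 (show 3 * scores.length / 4 < (PySem.List.sorted scores (fun x => x) false).length by omega)]
    have hq12 : (PySem.List.sorted scores (fun x => x) false)[scores.length / 4]'(by omega) ≤ (PySem.List.sorted scores (fun x => x) false)[scores.length / 2]'(by omega) :=
      PySem.List.sorted_id_getElem_mono scores (by omega) (by omega)
    have hq23 : (PySem.List.sorted scores (fun x => x) false)[scores.length / 2]'(by omega) ≤ (PySem.List.sorted scores (fun x => x) false)[3 * scores.length / 4]'(by omega) :=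
      PySem.List.sorted_id_getElem_mono scores (by omega) (by omega)
    simp only [List.cons.injEq, Prod.mk.injEq, true_and, and_true]
    refine ⟨?_, ?_, ?_, ?_⟩
    · rw [if_pos (show (scores.length : Int) > 0 by exact_mod_cast hpos),
          List.countP_eq_length_filter]
      omega
    · by_cases hn : 1 < scores.length
      · have hpe : List.filter (fun s => !decide (s ≤ (PySem.List.sorted scores (fun x => x) false)[scores.length / 4]'(by omega)) && decide (s ≤ (PySem.List.sorted scores (fun x => x) false)[scores.length / 2]'(by omega))) scores
            = List.filter (fun s => decide ((PySem.List.sorted scores (fun x => x) false)[scores.length / 4]'(by omega) < s) && decide (s ≤ (PySem.List.sorted scores (fun x => x) false)[scores.length / 2]'(by omega))) scores :=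
          List.filter_congr (fun a _ => by
            by_cases ha : a ≤ (PySem.List.sorted scores (fun x => x) false)[scores.length / 4]'(by omega)
            · simp [ha, decide_eq_false (not_lt.mpr ha)]
            · simp [ha, decide_eq_true (not_le.mp ha)])
        rw [if_pos (show (scores.length : Int) > 1 by exact_mod_cast hn),
            List.countP_eq_length_filter, hpe]
        omega
      · rw [if_neg (show ¬ (scores.length : Int) > 1 by exact_mod_cast hn),
            List.countP_eq_zero.mpr (fun a ha => by
              have := mem_le_sorted_top scores a ha (scores.length / 4) (by omega) (by omega)
              simp [this])]
        omega
    · by_cases hn : 2 < scores.length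
      · have hpe : List.filter (fun s => !decide (s ≤ (PySem.List.sorted scores (fun x => x) false)[scores.length / 4]'(by omega)) && !decide (s ≤ (PySem.List.sorted scores (fun x => x) false)[scores.length / 2]'(by omega)) && decide (s ≤ (PySem.List.sorted scores (fun x => x) false)[3 * scores.length / 4]'(by omega))) scores
            = List.filter (fun s => decide ((PySem.List.sorted scores (fun x => x) false)[scores.length / 2]'(by omega) < s) && decide (s ≤ (PySem.List.sorted scores (fun x => x) false)[3 * scores.length / 4]'(by omega))) scores :=
          List.filter_congr (fun a _ => by
            by_cases ha1 : a ≤ (PySem.List.sorted scores (fun x => x) false)[scores.length / 4]'(by omega)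
            · by_cases ha2 : a ≤ (PySem.List.sorted scores (fun x => x) false)[scores.length / 2]'(by omega)
              · simp [ha1, ha2, decide_eq_false (not_lt.mpr ha2)]
              · exact absurd (le_trans ha1 hq12) ha2
            · by_cases ha2 : a ≤ (PySem.List.sorted scores (fun x => x) false)[scores.length / 2]'(by omega)
              · simp [ha1, ha2, decide_eq_false (not_lt.mpr ha2)]
              · simp [ha1, ha2, decide_eq_true (not_le.mp ha2)])
        rw [if_pos (show (scores.length : Int) > 2 by exact_mod_cast hn),
            List.countP_eq_length_filter, hpe]
        omega
      · rw [if_neg (show ¬ (scores.length : Int) > 2 by exact_mod_cast hn),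
            List.countP_eq_zero.mpr (fun a ha => by
              have := mem_le_sorted_top scores a ha (scores.length / 2) (by omega) (by omega)
              simp [this])]
        omega
    · by_cases hn : 3 < scores.length
      · have hpe : List.filter (fun s => !decide (s ≤ (PySem.List.sorted scores (fun x => x) false)[scores.length / 4]'(by omega)) && !decide (s ≤ (PySem.List.sorted scores (fun x => x) false)[scores.length / 2]'(by omega)) && !decide (s ≤ (PySem.List.sorted scores (fun x => x) false)[3 * scores.length / 4]'(by omega))) scores
            = List.filter (fun s => decide ((PySem.List.sorted scores (fun x => x) false)[3 * scores.length / 4]'(by omega) < s)) scores :=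
          List.filter_congr (fun a _ => by
            by_cases ha3 : a ≤ (PySem.List.sorted scores (fun x => x) false)[3 * scores.length / 4]'(by omega)
            · simp [ha3, decide_eq_false (not_lt.mpr ha3)]
            · have h2' : ¬ a ≤ (PySem.List.sorted scores (fun x => x) false)[scores.length / 2]'(by omega) := fun hh => ha3 (le_trans hh hq23)
              have h1' : ¬ a ≤ (PySem.List.sorted scores (fun x => x) false)[scores.length / 4]'(by omega) := fun hh => h2' (le_trans hh hq12)
              simp [h1', h2', ha3, decide_eq_true (not_le.mp ha3)])
        rw [if_pos (show (scores.length : Int) > 3 by exact_mod_cast hn),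
            List.countP_eq_length_filter, hpe]
        omega
      · rw [if_neg (show ¬ (scores.length : Int) > 3 by exact_mod_cast hn),
            List.countP_eq_zero.mpr (fun a ha => by
              have := mem_le_sorted_top scores a ha (3 * scores.length / 4) (by omega) (by omega)
              simp [this])]
        omega
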